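-- pv_equiv track=rewrite | github.com/LukasSchoenenberger/IHC-Analysis-Pipeline | IHC-Analysis-Pipeline-Scripts/Calculate-Stain-Statistics.py | identify_stain_indices
-- ===== SOURCE A (Python) =====
-- def identify_stain_indices(stain_names):
--     """
--     Identify the indices for each stain channel based on the stain names
--
--     Args:
--         stain_names: List of stain names from the stain matrix
--
--     Returns:
--         tuple: (hematoxylin_idx, myelin_idx, microglia_idx)
--     """
--     # Initialize indices
--     hematoxylin_idx = None
--     myelin_idx = None
--     microglia_idx = None
--
--     # Search for each stain by keywords in name
--     for i, name in enumerate(stain_names):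
--         name_lower = name.lower()
--
--         # Check for hematoxylin (nuclei)
--         if any(keyword in name_lower for keyword in ['hematoxylin', 'nuclei', 'h&e', 'he']):
--             hematoxylin_idx = i
--
--         # Check for myelin
--         if any(keyword in name_lower for keyword in ['myelin', 'mbp', 'dab', 'blue']):
--             myelin_idx = i
--
--         # Check for microglia
--         if any(keyword in name_lower for keyword in ['microglia', 'cr3/43', 'brown']):
--             microglia_idx = i
--
--     # Apply fallbacks if any stain was not identified
--     num_stains = len(stain_names)
--
--     # Fallback for 3-stain case (most common)
--     if num_stains >= 3:
--         if hematoxylin_idx is None: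
--             hematoxylin_idx = 0  # Traditionally first stain
--         if myelin_idx is None:
--             myelin_idx = 1  # Traditionally second stain
--         if microglia_idx is None:
--             microglia_idx = 2  # Traditionally third stain
--
--     # Fallback for 2-stain case
--     elif num_stains == 2:
--         if hematoxylin_idx is None:
--             hematoxylin_idx = 0
--         if myelin_idx is None:
--             myelin_idx = 1
--         if microglia_idx is None:
--             microglia_idx = 1
--
--     # Fallback for 1-stain case
--     elif num_stains == 1:
--         if hematoxylin_idx is None:
--             hematoxylin_idx = 0
--         if myelin_idx is None:
--             myelin_idx = 0
--         if microglia_idx is None: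
--             microglia_idx = 0
--
--     return hematoxylin_idx, myelin_idx, microglia_idx
-- ===== SOURCE B (Python) =====
-- def identify_stain_indices(stain_names):
--     lowered = [name.lower() for name in stain_names]
--
--     def last_match(keywords):
--         # index of the LAST stain whose lowercased name contains any keyword
--         for i in range(len(lowered) - 1, -1, -1):
--             if any(kw in lowered[i] for kw in keywords):
--                 return i
--         return None
--
--     h = last_match(['hematoxylin', 'nuclei', 'h&e', 'he'])
--     m = last_match(['myelin', 'mbp', 'dab', 'blue'])
--     g = last_match(['microglia', 'cr3/43', 'brown'])
--
--     n = len(stain_names)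
--     defaults = (0, 1, 2) if n >= 3 else (0, 1, 1) if n == 2 else (0, 0, 0) if n == 1 else None
--     if defaults is None:
--         return h, m, g
--     return (defaults[0] if h is None else h,
--             defaults[1] if m is None else m,
--             defaults[2] if g is None else g)
-- ===== Notes on version B (the rewrite author's own statement) =====
-- stated objective: simpler
-- what changed: Replaces A's name-major single pass carrying three mutable slots plus a three-way fallback if-chain by a category-major decomposition: one small helper scans the lowered names from the back and returns the first (i.e. last) match per keyword group, and the fallbacks become a single defaults tuple selected by length and filled in uniformly.
import Mathlib
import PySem

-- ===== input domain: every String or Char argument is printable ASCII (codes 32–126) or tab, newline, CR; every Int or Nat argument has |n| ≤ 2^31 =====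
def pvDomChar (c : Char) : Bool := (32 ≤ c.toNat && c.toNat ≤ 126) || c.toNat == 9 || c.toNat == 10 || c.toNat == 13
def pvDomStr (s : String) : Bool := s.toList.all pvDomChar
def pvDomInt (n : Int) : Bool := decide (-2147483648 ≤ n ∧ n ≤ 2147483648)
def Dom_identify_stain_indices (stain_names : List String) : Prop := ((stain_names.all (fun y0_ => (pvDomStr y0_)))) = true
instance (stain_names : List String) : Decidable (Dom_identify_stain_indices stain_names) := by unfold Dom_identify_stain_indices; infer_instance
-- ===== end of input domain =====

-- B replaces the name-major scan with three mutable slots by a per-category backwards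
-- last-match helper and a defaults table applied uniformly (objective: simpler).

-- keyword groups (shared data between the two ports)
def pvKWH : List String := ["hematoxylin", "nuclei", "h&e", "he"]
def pvKWM : List String := ["myelin", "mbp", "dab", "blue"]
def pvKWG : List String := ["microglia", "cr3/43", "brown"]

-- any(keyword in name_lower for keyword in kws)
def pvHit (nl : String) (kws : List String) : Bool :=
  kws.any (fun kw => PySem.Str.isIn kw nl)

-- ===== PORT A =====
-- loop body of A: state (i, hematoxylin_idx, myelin_idx, microglia_idx)
def pvStepA (st : Int × Option Int × Option Int × Option Int) (name : String) :
    Int × Option Int × Option Int × Option Int :=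
  let nl := PySem.Str.lower name
  let h := if pvHit nl pvKWH then some st.1 else st.2.1
  let m := if pvHit nl pvKWM then some st.1 else st.2.2.1
  let g := if pvHit nl pvKWG then some st.1 else st.2.2.2
  (st.1 + 1, h, m, g)

def identify_stain_indices (stain_names : List String) : Option Int × Option Int × Option Int :=
  let st := stain_names.foldl pvStepA (0, none, none, none)
  let h := st.2.1
  let m := st.2.2.1
  let g := st.2.2.2
  let n : Int := stain_names.length
  if 3 ≤ n then
    (if h = none then some 0 else h, if m = none then some 1 else m, if g = none then some 2 else g)
  else if n = 2 then
    (if h = none then some 0 else h, if m = none then some 1 else m, if g = none then some 1 else g)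
  else if n = 1 then
    (if h = none then some 0 else h, if m = none then some 0 else m, if g = none then some 0 else g)
  else (h, m, g)

-- ===== PORT B =====
-- B's `last_match`: scan the lowered names from the back, return the first hit's index
-- (an element of `lowered.reverse` with tail `rest` has original index `rest.length`)
def pvLastMatchGo (kws : List String) : List String → Option Int
  | [] => none
  | nl :: rest => if pvHit nl kws then some (rest.length : Int) else pvLastMatchGo kws rest

def pvLastMatch (lowered kws : List String) : Option Int :=
  pvLastMatchGo kws lowered.reverse

def identify_stain_indices_alt (stain_names : List String) : Option Int × Option Int × Option Int :=
  let lowered := stain_names.map PySem.Str.lower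
  let h := pvLastMatch lowered pvKWH
  let m := pvLastMatch lowered pvKWM
  let g := pvLastMatch lowered pvKWG
  let n : Int := stain_names.length
  let defaults : Option (Int × Int × Int) :=
    if 3 ≤ n then some (0, 1, 2)
    else if n = 2 then some (0, 1, 1)
    else if n = 1 then some (0, 0, 0)
    else none
  match defaults with
  | none => (h, m, g)
  | some d => (some (h.getD d.1), some (m.getD d.2.1), some (g.getD d.2.2))

-- ===== PRECONDITION & SPEC =====
def Spec_identify_stain_indices (stain_names : List String) (out : Option Int × Option Int × Option Int) : Prop := out = identify_stain_indices_alt stain_names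
instance (stain_names : List String) (out : Option Int × Option Int × Option Int) : Decidable (Spec_identify_stain_indices stain_names out) := by unfold Spec_identify_stain_indices; infer_instance

-- ===== CLAIM (what is proved, stated in full; the proofs are below) =====
def Claim_equal_identify_stain_indices : Prop := ∀ (stain_names : List String), Dom_identify_stain_indices stain_names → Spec_identify_stain_indices stain_names (identify_stain_indices stain_names)

-- ===== LEMMAS AND PROOFS =====

-- "last index found forward" update: combine an initial slot with a shifted last-match result
def pvUpd (init : Option Int) (r : Option Int) (i0 : Int) : Option Int :=
  match r with
  | some j => some (i0 + j)
  | none => init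

theorem pvGo_append (kws : List String) (xs : List String) (y : String) :
    pvLastMatchGo kws (xs ++ [y]) =
      match pvLastMatchGo kws xs with
      | some j => some (j + 1)
      | none => if pvHit y kws then some 0 else none := by
  induction xs with
  | nil => simp [pvLastMatchGo]
  | cons x t ih =>
      by_cases hx : pvHit x kws
      · simp [pvLastMatchGo, hx]
      · simpa [pvLastMatchGo, hx] using ih

theorem pvLastMatch_cons (kws : List String) (nl : String) (rest : List String) :
    pvLastMatch (nl :: rest) kws =
      match pvLastMatch rest kws with
      | some j => some (j + 1)
      | none => if pvHit nl kws then some 0 else none := by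
  simp [pvLastMatch, pvGo_append]

theorem pvFoldA_eq (names : List String) : ∀ (i0 : Int) (h m g : Option Int),
    names.foldl pvStepA (i0, h, m, g) =
      (i0 + names.length,
       pvUpd h (pvLastMatch (names.map PySem.Str.lower) pvKWH) i0,
       pvUpd m (pvLastMatch (names.map PySem.Str.lower) pvKWM) i0,
       pvUpd g (pvLastMatch (names.map PySem.Str.lower) pvKWG) i0) := by
  induction names with
  | nil => intro i0 h m g; simp [pvUpd, pvLastMatch, pvLastMatchGo]
  | cons name rest ih =>
      intro i0 h m g
      rw [List.foldl_cons, pvStepA, ih]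
      refine Prod.ext ?_ (Prod.ext ?_ (Prod.ext ?_ ?_)) <;>
        simp only [List.map_cons, pvLastMatch_cons]
      · simp [List.length_cons]; ring
      · cases hr : pvLastMatch (rest.map PySem.Str.lower) pvKWH <;>
          by_cases hx : pvHit (PySem.Str.lower name) pvKWH <;>
          simp [pvUpd, hx] <;> ring
      · cases hr : pvLastMatch (rest.map PySem.Str.lower) pvKWM <;>
          by_cases hx : pvHit (PySem.Str.lower name) pvKWM <;>
          simp [pvUpd, hx] <;> ring
      · cases hr : pvLastMatch (rest.map PySem.Str.lower) pvKWG <;>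
          by_cases hx : pvHit (PySem.Str.lower name) pvKWG <;>
          simp [pvUpd, hx] <;> ring

-- ===== VERDICT (by name: the statement is the Claim_ definition above) =====
theorem identify_stain_indices_spec : Claim_equal_identify_stain_indices := by
  intro names _
  unfold Spec_identify_stain_indices identify_stain_indices identify_stain_indices_alt
  rw [pvFoldA_eq]
  rcases hH : pvLastMatch (names.map PySem.Str.lower) pvKWH with _ | jH <;>
  rcases hM : pvLastMatch (names.map PySem.Str.lower) pvKWM with _ | jM <;>
  rcases hG : pvLastMatch (names.map PySem.Str.lower) pvKWG with _ | jG <;>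
    simp [pvUpd, hH, hM, hG] <;> split_ifs <;> simp_all
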